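-- pv_equiv track=rewrite | github.com/miguepollo/Asistente-Virtual-Kubik | src/utils/validators.py | sanitize_tts_text
-- ===== SOURCE A (Python) =====
-- def sanitize_tts_text(text: str) -> str:
--     """
--     Sanitiza texto para TTS eliminando caracteres potencialmente peligrosos.
--
--     Args:
--         text: Texto a sanitizar
--
--     Returns:
--         Texto sanitizado seguro para TTS
--     """
--     if not text or not isinstance(text, str):
--         return ""
--
--     # Limitar longitud para prevenir DoS
--     text = text[:1000]
--
--     # Eliminar caracteres de control y peligrosos
--     dangerous_chars = ['<', '>', '"', "'", '&', ';', '|', '$', '`', '\\', '\n', '\r', '\t', '\x00']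
--     for char in dangerous_chars:
--         text = text.replace(char, ' ')
--
--     return text.strip()
-- ===== SOURCE B (Python) =====
-- DANGEROUS = set('<>"\'&;|$`\\\n\r\t\x00')
--
--
-- def sanitize_tts_text(text: str) -> str:
--     if not text or not isinstance(text, str):
--         return ""
--     text = text[:1000]
--     return ''.join(' ' if c in DANGEROUS else c for c in text).strip()
-- ===== Notes on version B (the rewrite author's own statement) =====
-- stated objective: idiomatic
-- what changed: Replaces the loop of 14 full-string str.replace scans with a single character-by-character pass testing membership in a precomputed set and joining the result, then stripping.
import Mathlib
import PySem

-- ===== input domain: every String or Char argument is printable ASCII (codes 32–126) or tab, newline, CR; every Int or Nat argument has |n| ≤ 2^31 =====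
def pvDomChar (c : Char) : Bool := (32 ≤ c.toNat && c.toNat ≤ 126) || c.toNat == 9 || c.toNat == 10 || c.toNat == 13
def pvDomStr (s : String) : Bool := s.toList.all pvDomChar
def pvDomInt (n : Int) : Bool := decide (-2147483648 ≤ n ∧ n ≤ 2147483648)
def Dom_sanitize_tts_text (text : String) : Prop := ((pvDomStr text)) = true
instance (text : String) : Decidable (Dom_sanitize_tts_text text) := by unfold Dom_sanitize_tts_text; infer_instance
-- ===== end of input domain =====

-- B replaces A's loop of 14 full-string replace scans by one character pass with a set membership test (idiomatic single pass); return value proved identical.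

-- ===== PORT A =====
def pvDangerousStrs : List String := ["<", ">", "\"", "'", "&", ";", "|", "$", "`", "\\", "\n", "\r", "\t", "\x00"]

def sanitize_tts_text (text : String) : String :=
  if text = "" then ""
  else
    let t := PySem.Str.slice text none (some 1000)
    let t := pvDangerousStrs.foldl (fun s ch => PySem.Str.replace s ch " ") t
    PySem.Str.strip t

-- ===== PORT B =====
def pvDangerousSet : PySem.Set Char := PySem.Set.ofList "<>\"'&;|$`\\\n\r\t\x00".toList

def sanitize_tts_text_alt (text : String) : String :=
  if text = "" then ""
  else
    let t := PySem.Str.slice text none (some 1000)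
    -- ''.join over single characters = String.ofList of the mapped character list
    let sanitized := String.ofList (t.toList.map (fun c => if pvDangerousSet.contains c then ' ' else c))
    PySem.Str.strip sanitized

-- ===== PRECONDITION & SPEC =====
def Spec_sanitize_tts_text (text : String) (out : String) : Prop := out = sanitize_tts_text_alt text
instance (text : String) (out : String) : Decidable (Spec_sanitize_tts_text text out) := by unfold Spec_sanitize_tts_text; infer_instance

-- ===== CLAIM (what is proved, stated in full; the proofs are below) =====
def Claim_equal_sanitize_tts_text : Prop := ∀ (text : String), Dom_sanitize_tts_text text → Spec_sanitize_tts_text text (sanitize_tts_text text)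

-- ===== LEMMAS AND PROOFS =====
-- str.replace with a single-char pattern and single-char replacement is a character map
theorem pv_replace_go_single (c d : Char) :
    ∀ (l : List Char) (fuel : Nat) (acc : List Char), l.length ≤ fuel →
      PySem.Chars.replace.go [c] [d] fuel l acc
        = acc.reverse ++ l.map (fun x => if x = c then d else x) := by
  intro l
  induction l with
  | nil =>
    intro fuel acc _
    cases fuel <;> simp [PySem.Chars.replace.go]
  | cons c' t ih =>
    intro fuel acc hle
    cases fuel with
    | zero => simp at hle
    | succ fuel' =>
      rw [PySem.Chars.replace.go]
      by_cases h : c' = c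
      · subst h
        rw [if_pos (by simp [List.isPrefixOf])]
        rw [show List.drop [c'].length (c' :: t) = t from rfl]
        rw [ih _ _ (by simpa using Nat.le_of_succ_le_succ hle)]
        simp
      · rw [if_neg (by simp [List.isPrefixOf]; exact fun hh => h hh.symm)]
        rw [ih _ _ (by simpa using Nat.le_of_succ_le_succ hle)]
        simp [h]

theorem pv_replace_single (c d : Char) (cs : List Char) :
    PySem.Chars.replace cs [c] [d] = cs.map (fun x => if x = c then d else x) := by
  rw [PySem.Chars.replace]
  rw [if_neg (by simp : ¬([c].isEmpty = true))]
  simpa using pv_replace_go_single c d cs cs.length [] le_rfl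

-- sequentially mapping each dangerous char to ' ' equals one map testing membership
theorem pv_fold_maps (ds : List Char) : ∀ cs : List Char,
    ds.foldl (fun s c => s.map (fun x => if x = c then ' ' else x)) cs
      = cs.map (fun x => if ds.contains x then ' ' else x) := by
  induction ds with
  | nil => intro cs; simp
  | cons d ds ih =>
    intro cs
    simp only [List.foldl_cons]
    rw [ih (cs.map (fun x => if x = d then ' ' else x))]
    rw [List.map_map]
    apply List.map_congr_left
    intro x _
    by_cases hx : x = d
    · subst hx
      simp only [Function.comp, List.contains_cons, BEq.rfl, Bool.true_or, if_pos]
      split <;> rfl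
    · simp only [Function.comp, if_neg hx, List.contains_cons, Bool.or_eq_true, beq_iff_eq]
      simp [hx]

-- ===== VERDICT (by name: the statement is the Claim_ definition above) =====
set_option maxRecDepth 16384 in
theorem sanitize_tts_text_spec : Claim_equal_sanitize_tts_text := by
  intro text _
  unfold Spec_sanitize_tts_text sanitize_tts_text sanitize_tts_text_alt
  by_cases h : text = ""
  · simp [h]
  · simp only [h, if_false]
    set t := PySem.Str.slice text none (some 1000) with ht
    apply congrArg
    simp only [pvDangerousStrs, List.foldl_cons, List.foldl_nil, PySem.Str.replace]
    simp only [show ("<" : String).toList = ['<'] from rfl, show (">" : String).toList = ['>'] from rfl,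
      show ("\"" : String).toList = ['"'] from rfl, show ("'" : String).toList = ['\''] from rfl,
      show ("&" : String).toList = ['&'] from rfl, show (";" : String).toList = [';'] from rfl,
      show ("|" : String).toList = ['|'] from rfl, show ("$" : String).toList = ['$'] from rfl,
      show ("`" : String).toList = ['`'] from rfl, show ("\\" : String).toList = ['\\'] from rfl,
      show ("\n" : String).toList = ['\n'] from rfl, show ("\r" : String).toList = ['\r'] from rfl,
      show ("\t" : String).toList = ['\t'] from rfl, show ("\x00" : String).toList = ['\x00'] from rfl,
      show (" " : String).toList = [' '] from rfl]
    simp only [String.toList_ofList, pv_replace_single]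
    have hset : pvDangerousSet = ['<','>','"','\'','&',';','|','$','`','\\','\n','\r','\t','\x00'] := by decide
    rw [hset]
    simp only [PySem.Set.contains]
    have hfold := pv_fold_maps ['<','>','"','\'','&',';','|','$','`','\\','\n','\r','\t','\x00'] t.toList
    simp only [List.foldl_cons, List.foldl_nil] at hfold
    exact congrArg String.ofList hfold
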